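-- pv_equiv track=rewrite | github.com/triposat/Daily-Coding-Challenges | 2389-longest-subsequence-with-limited-sum/2389-longest-subsequence-with-limited-sum.py | answerQueries
-- ===== SOURCE A (Python) =====
-- from typing import List
--
-- def answerQueries(nums: List[int], queries: List[int]) -> List[int]:
--     def bise(arr, q):
--         st=0
--         end=len(arr)
--         while st<end:
--             mid=(st+end)>>1
--             if arr[mid]==q:
--                 return mid+1
--             elif arr[mid]<q:
--                 st=mid+1
--             else:
--                 end=mid
--         return st
--     nums.sort()
--     for i in range(1, len(nums)):
--         nums[i]=nums[i-1]+nums[i]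
--     return [bise(nums, q) for q in queries]
-- ===== SOURCE B (Python) =====
-- from typing import List
--
-- def answerQueries(nums: List[int], queries: List[int]) -> List[int]:
--     # Same return value and same in-place mutation of nums as the original:
--     # running prefix sums of sorted(nums) written back, then per-query lookup.
--     pref = []
--     total = 0
--     for v in sorted(nums):
--         total += v
--         pref.append(total)
--     nums[:] = pref
--
--     def search(arr, off, q):
--         # divide-and-conquer on explicit sublists instead of an index while-loop
--         if not arr:
--             return off
--         mid = len(arr) >> 1
--         v = arr[mid]
--         if v == q:
--             return off + mid + 1
--         if v < q:
--             return search(arr[mid + 1:], off + mid + 1, q)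
--         return search(arr[:mid], off, q)
--
--     cache = {}
--     out = []
--     for q in queries:
--         if q not in cache:
--             cache[q] = search(pref, 0, q)
--         out.append(cache[q])
--     return out
-- ===== Notes on version B (the rewrite author's own statement) =====
-- stated objective: alternative
-- what changed: prefix sums built by a running-total accumulation instead of an in-place indexed overwrite loop, the per-query index while-loop replaced by a divide-and-conquer recursion on explicit sublists carrying an offset, and a memo dict so duplicate queries are searched once
import Mathlib
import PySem

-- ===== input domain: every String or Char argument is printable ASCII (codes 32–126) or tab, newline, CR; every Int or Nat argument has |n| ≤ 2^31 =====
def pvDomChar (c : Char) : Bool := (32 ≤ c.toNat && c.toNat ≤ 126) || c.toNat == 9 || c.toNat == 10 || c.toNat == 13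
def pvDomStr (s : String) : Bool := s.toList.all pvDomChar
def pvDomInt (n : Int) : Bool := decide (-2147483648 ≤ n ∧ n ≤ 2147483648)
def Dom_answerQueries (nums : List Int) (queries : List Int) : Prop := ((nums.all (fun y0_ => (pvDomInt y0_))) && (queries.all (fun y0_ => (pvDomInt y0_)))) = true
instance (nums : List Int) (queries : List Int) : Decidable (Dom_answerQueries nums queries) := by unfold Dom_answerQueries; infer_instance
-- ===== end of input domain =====

-- B differs from A by a running-total prefix build, a divide-and-conquer search on sublists
-- instead of an index while-loop, and a memo dict for duplicate queries; equivalence is about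
-- the return value (both Pythons perform the same in-place mutation of nums).

-- ===== PORT A =====
-- the inner while-loop of bise; st/end are always nonnegative Python ints, so Nat indices
-- and Nat '/2' coincide with Python's '(st+end)>>1'
def biseLoop (arr : List Int) (q : Int) (st en : Nat) : Int :=
  if _h : st < en then
    if PySem.List.pyGetD arr (((st + en) / 2 : Nat) : Int) 0 = q then (((st + en) / 2 : Nat) : Int) + 1
    else if PySem.List.pyGetD arr (((st + en) / 2 : Nat) : Int) 0 < q then
      biseLoop arr q ((st + en) / 2 + 1) en
    else
      biseLoop arr q st ((st + en) / 2)
  else (st : Int)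
termination_by en - st
decreasing_by all_goals omega

def answerQueries (nums : List Int) (queries : List Int) : List Int :=
  let s := PySem.List.sorted nums (fun x => x) false
  let arr := (PySem.List.pyRange 1 (s.length : Int) 1).foldl
      (fun l i => PySem.List.pySetD l i (PySem.List.pyGetD l (i - 1) 0 + PySem.List.pyGetD l i 0)) s
  queries.map (fun q => biseLoop arr q 0 arr.length)

-- ===== PORT B =====
-- recursive search on explicit sublists (Source B's `search`); `arr[mid]` is in range whenever read
def searchAlt (arr : List Int) (off : Int) (q : Int) : Int :=
  if _h : arr = [] then off
  else
    if PySem.List.pyGetD arr ((arr.length / 2 : Nat) : Int) 0 = q then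
      off + ((arr.length / 2 : Nat) : Int) + 1
    else if PySem.List.pyGetD arr ((arr.length / 2 : Nat) : Int) 0 < q then
      searchAlt (PySem.List.slice arr (some ((arr.length / 2 + 1 : Nat) : Int)) none)
        (off + ((arr.length / 2 : Nat) : Int) + 1) q
    else
      searchAlt (PySem.List.slice arr none (some ((arr.length / 2 : Nat) : Int))) off q
termination_by arr.length
decreasing_by
  · rw [PySem.List.slice_from_natCast]
    simp only [List.length_drop]
    have : 0 < arr.length := List.length_pos_of_ne_nil _h
    omega
  · rw [PySem.List.slice_to_natCast]
    simp only [List.length_take]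
    have : 0 < arr.length := List.length_pos_of_ne_nil _h
    omega

def answerQueries_alt (nums : List Int) (queries : List Int) : List Int :=
  let pref := ((PySem.List.sorted nums (fun x => x) false).foldl
      (fun st v => (st.1 + v, st.2 ++ [st.1 + v])) ((0 : Int), ([] : List Int))).2
  (queries.foldl
      (fun (st : PySem.Dict Int Int × List Int) q =>
        let c := if st.1.contains q then st.1 else st.1.insert q (searchAlt pref 0 q)
        (c, st.2 ++ [c.getD q 0]))
      (PySem.Dict.empty, [])).2

-- ===== PRECONDITION & SPEC =====
def Spec_answerQueries (nums : List Int) (queries : List Int) (out : List Int) : Prop := out = answerQueries_alt nums queries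
instance (nums : List Int) (queries : List Int) (out : List Int) : Decidable (Spec_answerQueries nums queries out) := by unfold Spec_answerQueries; infer_instance

-- ===== CLAIM (what is proved, stated in full; the proofs are below) =====
def Claim_equal_answerQueries : Prop := ∀ (nums : List Int) (queries : List Int), Dom_answerQueries nums queries → Spec_answerQueries nums queries (answerQueries nums queries)

-- ===== LEMMAS AND PROOFS =====

-- the running prefix sums of xs starting from total t
def prefRun (t : Int) : List Int → List Int
  | [] => []
  | v :: s => (t + v) :: prefRun (t + v) s

theorem length_prefRun (t : Int) (xs : List Int) : (prefRun t xs).length = xs.length := by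
  induction xs generalizing t with
  | nil => rfl
  | cons v s ih => simp [prefRun, ih]

theorem prefRun_append (t : Int) (xs ys : List Int) :
    prefRun t (xs ++ ys) = prefRun t xs ++ prefRun (t + xs.sum) ys := by
  induction xs generalizing t with
  | nil => simp [prefRun]
  | cons v s ih => simp [prefRun, ih, add_assoc]

theorem getElem_prefRun (t : Int) (xs : List Int) (j : Nat) (h : j < xs.length)
    (h' : j < (prefRun t xs).length) :
    (prefRun t xs)[j] = t + (xs.take (j + 1)).sum := by
  induction xs generalizing t j with
  | nil => simp at h
  | cons v s ih =>
    cases j with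
    | zero => simp [prefRun]
    | succ k =>
      simp only [prefRun, List.getElem_cons_succ, List.take_succ_cons, List.sum_cons]
      rw [ih (t + v) k (by simpa using h) (by simpa [length_prefRun] using h)]
      ring

-- B's prefix fold computes prefRun
theorem foldB_eq_prefRun (xs : List Int) (t : Int) (acc : List Int) :
    xs.foldl (fun st v => (st.1 + v, st.2 ++ [st.1 + v])) (t, acc)
      = (t + xs.sum, acc ++ prefRun t xs) := by
  induction xs generalizing t acc with
  | nil => simp [prefRun]
  | cons v s ih =>
    simp only [List.foldl_cons, List.sum_cons, prefRun]
    rw [ih (t + v) (acc ++ [t + v])]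
    simp [Prod.ext_iff, List.append_assoc]
    ring

-- A's in-place range loop computes prefRun on the same list
theorem foldA_eq_prefRun (s : List Int) :
    (PySem.List.pyRange 1 (s.length : Int) 1).foldl
      (fun l i => PySem.List.pySetD l i (PySem.List.pyGetD l (i - 1) 0 + PySem.List.pyGetD l i 0)) s
      = prefRun 0 s := by
  have main : ∀ (k : Nat), k ≤ s.length →
      (PySem.List.pyRange 1 (k : Int) 1).foldl
        (fun l i => PySem.List.pySetD l i (PySem.List.pyGetD l (i - 1) 0 + PySem.List.pyGetD l i 0)) s
        = prefRun 0 (s.take k) ++ s.drop k := by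
    intro k
    induction k with
    | zero =>
      intro _
      rw [PySem.List.pyRange_one_eq_nil (by norm_num)]
      simp [prefRun]
    | succ k ih =>
      intro hk
      rcases Nat.eq_zero_or_pos k with hk0 | hkpos
      · subst hk0
        rw [PySem.List.pyRange_one_eq_nil (by norm_num)]
        cases s with
        | nil => simp at hk
        | cons a t => simp [prefRun]
      · have h1k : (1 : Int) ≤ (k : Int) := by exact_mod_cast hkpos
        rw [show ((k + 1 : Nat) : Int) = (k : Int) + 1 by push_cast; ring,
          PySem.List.pyRange_one_succ_right h1k, List.foldl_append, ih (by omega)]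
        simp only [List.foldl_cons, List.foldl_nil]
        have hklen : k < s.length := by omega
        have hlenl : (prefRun 0 (s.take k) ++ s.drop k).length = s.length := by
          simp [length_prefRun, List.length_take]
          omega
        have hlpre : (prefRun 0 (s.take k)).length = k := by
          simp [length_prefRun, List.length_take]
          omega
        -- the two reads
        have hcast : (k : Int) - 1 = ((k - 1 : Nat) : Int) := by
          push_cast [Nat.cast_sub hkpos]; ring
        have hget1 : PySem.List.pyGetD (prefRun 0 (s.take k) ++ s.drop k) ((k : Int) - 1) 0
            = (s.take k).sum := by
          rw [hcast, PySem.List.pyGetD_natCast]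
          have hlt : k - 1 < (prefRun 0 (s.take k) ++ s.drop k).length := by omega
          rw [List.getD_eq_getElem _ _ hlt,
            List.getElem_append_left (by omega),
            getElem_prefRun 0 (s.take k) (k - 1) (by simp [List.length_take]; omega) (by omega)]
          rw [show k - 1 + 1 = k by omega]
          simp [List.take_take]
        have hget2 : PySem.List.pyGetD (prefRun 0 (s.take k) ++ s.drop k) (k : Int) 0
            = s[k] := by
          rw [PySem.List.pyGetD_natCast]
          have hlt : k < (prefRun 0 (s.take k) ++ s.drop k).length := by omega
          rw [List.getD_eq_getElem _ _ hlt,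
            List.getElem_append_right (by omega)]
          simp [hlpre]
        rw [hget1, hget2, PySem.List.pySetD_natCast]
        have hdropk : s.drop k = s[k] :: s.drop (k + 1) := List.drop_eq_getElem_cons hklen
        have htakek : s.take (k + 1) = s.take k ++ [s[k]] := by
          rw [List.take_add_one]
          simp [List.getElem?_eq_getElem hklen]
        rw [htakek, prefRun_append, hdropk]
        rw [List.set_append_right _ _ (by omega)]
        simp [prefRun, hlpre]
        rw [hdropk, List.set_cons_zero]
  have := main s.length (le_refl _)
  simpa using this

-- the while-loop search equals the sublist search
theorem biseLoop_eq_searchAlt (n : Nat) (arr : List Int) (q : Int) (st en : Nat)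
    (hfuel : en - st ≤ n) (hen : en ≤ arr.length) :
    biseLoop arr q st en = searchAlt ((arr.drop st).take (en - st)) (st : Int) q := by
  induction n generalizing st en with
  | zero =>
    have hse : en ≤ st := by omega
    rw [biseLoop, dif_neg (by omega)]
    rw [show en - st = 0 by omega]
    rw [searchAlt, dif_pos (by simp)]
  | succ n ih =>
    by_cases hlt : st < en
    · have hsub : ((arr.drop st).take (en - st)).length = en - st := by
        simp [List.length_take, List.length_drop]
        omega
      have hne : (arr.drop st).take (en - st) ≠ [] := by
        intro h
        rw [h] at hsub
        simp at hsub
        omega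
      have hmid : ((arr.drop st).take (en - st)).length / 2 = (en - st) / 2 := by rw [hsub]
      have hmidlt : (en - st) / 2 < en - st := by omega
      have hidx : st + (en - st) / 2 = (st + en) / 2 := by omega
      have hgetsub : PySem.List.pyGetD ((arr.drop st).take (en - st))
          ((((arr.drop st).take (en - st)).length / 2 : Nat) : Int) 0
          = PySem.List.pyGetD arr ((((st + en) / 2 : Nat)) : Int) 0 := by
        rw [hmid, PySem.List.pyGetD_natCast, PySem.List.pyGetD_natCast]
        have h1 : (en - st) / 2 < ((arr.drop st).take (en - st)).length := by omega
        have h2 : (st + en) / 2 < arr.length := by omega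
        rw [List.getD_eq_getElem _ _ h1, List.getD_eq_getElem _ _ h2]
        rw [List.getElem_take, List.getElem_drop]
        congr 1
      rw [biseLoop, dif_pos hlt, searchAlt, dif_neg hne, hgetsub]
      by_cases heq : PySem.List.pyGetD arr ((((st + en) / 2 : Nat)) : Int) 0 = q
      · rw [if_pos heq, if_pos heq]
        rw [hmid]
        omega
      · rw [if_neg heq, if_neg heq]
        by_cases hlt2 : PySem.List.pyGetD arr ((((st + en) / 2 : Nat)) : Int) 0 < q
        · rw [if_pos hlt2, if_pos hlt2]
          rw [ih ((st + en) / 2 + 1) en (by omega) hen, hmid, PySem.List.slice_from_natCast,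
            List.drop_take, List.drop_drop,
            show st + ((en - st) / 2 + 1) = (st + en) / 2 + 1 by omega,
            show en - st - ((en - st) / 2 + 1) = en - ((st + en) / 2 + 1) by omega,
            show (st : Int) + (((en - st) / 2 : Nat) : Int) + 1 = (((st + en) / 2 + 1 : Nat) : Int) by omega]
        · rw [if_neg hlt2, if_neg hlt2]
          rw [ih st ((st + en) / 2) (by omega) (by omega), hmid, PySem.List.slice_to_natCast,
            List.take_take,
            show min ((en - st) / 2) (en - st) = (st + en) / 2 - st by omega]
    · rw [biseLoop, dif_neg hlt]
      rw [show en - st = 0 by omega]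
      rw [searchAlt, dif_pos (by simp)]

-- the memo-dict loop is a map
theorem cacheLoop_eq_map (f : Int → Int) (qs : List Int) (d : PySem.Dict Int Int)
    (acc : List Int) (hd : ∀ k v, d.get? k = some v → v = f k) :
    (qs.foldl
      (fun (st : PySem.Dict Int Int × List Int) q =>
        (if st.1.contains q then st.1 else st.1.insert q (f q),
         st.2 ++ [(if st.1.contains q then st.1 else st.1.insert q (f q)).getD q 0])) (d, acc)).2
      = acc ++ qs.map f := by
  induction qs generalizing d acc with
  | nil => simp
  | cons q qs ih =>
    simp only [List.foldl_cons, List.map_cons]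
    by_cases hc : d.contains q = true
    · rw [if_pos hc]
      have hsome : (d.get? q).isSome := by
        rw [← PySem.Dict.contains_eq_isSome_get?]; exact hc
      obtain ⟨v, hv⟩ := Option.isSome_iff_exists.mp hsome
      have hgd : d.getD q 0 = f q := by
        rw [PySem.Dict.getD_eq_get?_getD, hv, Option.getD_some, hd q v hv]
      rw [hgd, ih d (acc ++ [f q]) hd]
      simp
    · rw [if_neg hc]
      rw [PySem.Dict.getD_insert_self]
      rw [ih (d.insert q (f q)) (acc ++ [f q])]
      · simp
      · intro k v hkv
        rw [PySem.Dict.get?_insert] at hkv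
        by_cases hkq : k = q
        · rw [if_pos hkq] at hkv
          cases hkv
          rw [hkq]
        · rw [if_neg hkq] at hkv
          exact hd k v hkv

-- ===== VERDICT (by name: the statement is the Claim_ definition above) =====
theorem answerQueries_spec : Claim_equal_answerQueries := by
  intro nums queries _
  unfold Spec_answerQueries
  simp only [answerQueries, answerQueries_alt]
  rw [foldA_eq_prefRun, foldB_eq_prefRun]
  simp only [List.nil_append]
  rw [cacheLoop_eq_map (fun q => searchAlt (prefRun 0 (PySem.List.sorted nums (fun x => x) false)) 0 q)
      queries PySem.Dict.empty [] (by intro k v h; simp [PySem.Dict.get?_empty] at h)]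
  simp only [List.nil_append]
  apply List.map_congr_left
  intro q _
  have := biseLoop_eq_searchAlt (prefRun 0 (PySem.List.sorted nums (fun x => x) false)).length
    (prefRun 0 (PySem.List.sorted nums (fun x => x) false)) q 0
    (prefRun 0 (PySem.List.sorted nums (fun x => x) false)).length (by omega) (by omega)
  simpa using this
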